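-- pv_equiv track=rewrite | github.com/SchubfreiDenny/analysis-report-pdf-parser | parser.py | _categorize_markers
-- ===== SOURCE A (Python) =====
-- from typing import Dict, List, Any, Optional
--
-- def _categorize_markers(markers: List[Dict[str, Any]]) -> Dict[str, List[Dict[str, Any]]]:
--     """Organize markers by medical categories"""
--
--     categories = {
--         "hematology": [],
--         "hormones": [],
--         "fatty_acids": [],
--         "clinical_chemistry": [],
--         "metals_trace_elements": [],
--         "micronutrients": [],
--         "clinical_immunology": []
--     }
--
--     for marker in markers:
--         category = marker.get('category', 'clinical_chemistry')
--         if category in categories: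
--             # Remove category field from individual marker
--             clean_marker = {k: v for k, v in marker.items() if k != 'category'}
--             categories[category].append(clean_marker)
--
--     return categories
-- ===== SOURCE B (Python) =====
-- from typing import Dict, List, Any
--
-- _CATEGORIES = [
--     "hematology",
--     "hormones",
--     "fatty_acids",
--     "clinical_chemistry",
--     "metals_trace_elements",
--     "micronutrients",
--     "clinical_immunology",
-- ]
--
-- def _categorize_markers(markers: List[Dict[str, Any]]) -> Dict[str, List[Dict[str, Any]]]:
--     """Organize markers by medical categories (per-category scan over the markers)."""
--     return {
--         category: [
--             {k: v for k, v in marker.items() if k != 'category'}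
--             for marker in markers
--             if marker.get('category', 'clinical_chemistry') == category
--         ]
--         for category in _CATEGORIES
--     }
-- ===== Notes on version B (the rewrite author's own statement) =====
-- stated objective: simpler
-- what changed: Inverted the nesting: instead of a single scatter pass that looks up and appends to a mutable bucket dict, B is one dict comprehension over the seven fixed category names, each bucket built by filtering the marker list on its resolved category; unknown categories drop out because only the fixed keys are produced.
import Mathlib
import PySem

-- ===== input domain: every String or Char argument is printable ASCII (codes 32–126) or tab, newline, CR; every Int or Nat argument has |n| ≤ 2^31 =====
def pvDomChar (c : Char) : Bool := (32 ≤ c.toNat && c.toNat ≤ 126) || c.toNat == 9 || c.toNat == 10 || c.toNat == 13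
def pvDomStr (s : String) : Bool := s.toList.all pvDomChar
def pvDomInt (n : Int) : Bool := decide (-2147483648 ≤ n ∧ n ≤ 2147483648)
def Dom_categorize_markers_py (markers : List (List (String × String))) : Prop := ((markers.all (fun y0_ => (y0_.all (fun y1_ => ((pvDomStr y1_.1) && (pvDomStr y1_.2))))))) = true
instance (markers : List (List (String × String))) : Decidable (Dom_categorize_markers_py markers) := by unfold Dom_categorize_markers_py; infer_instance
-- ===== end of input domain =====

-- B inverts A's nesting: instead of one scatter pass appending into a mutable bucket dict,
-- B maps over the seven fixed category names and filters the marker list per category (objective: simpler).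


-- ===== PORT A =====
def categorize_markers_py (markers : List (List (String × String))) : List (String × List (List (String × String))) :=
  let categories : PySem.Dict String (List (List (String × String))) :=
    PySem.Dict.ofList [("hematology", []), ("hormones", []), ("fatty_acids", []),
      ("clinical_chemistry", []), ("metals_trace_elements", []),
      ("micronutrients", []), ("clinical_immunology", [])]
  (markers.foldl (fun cats marker =>
      let category := (PySem.Dict.ofList marker).getD "category" "clinical_chemistry"
      if cats.contains category then
        let clean_marker := (PySem.Dict.ofList marker).items.filter (fun kv => kv.1 != "category")
        -- categories[category].append(clean_marker): the key is present, so this appends in place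
        cats.modify category [] (fun l => l ++ [clean_marker])
      else cats) categories).items

-- ===== PORT B =====
def pvCatNames : List String :=
  ["hematology", "hormones", "fatty_acids", "clinical_chemistry",
   "metals_trace_elements", "micronutrients", "clinical_immunology"]

def categorize_markers_py_alt (markers : List (List (String × String))) : List (String × List (List (String × String))) :=
  pvCatNames.map (fun category =>
    (category,
      (markers.filter (fun marker =>
          (PySem.Dict.ofList marker).getD "category" "clinical_chemistry" == category)).map
        (fun marker =>
          (PySem.Dict.ofList marker).items.filter (fun kv => kv.1 != "category"))))

-- ===== PRECONDITION & SPEC =====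
def Spec_categorize_markers_py (markers : List (List (String × String))) (out : List (String × List (List (String × String)))) : Prop := out = categorize_markers_py_alt markers
instance (markers : List (List (String × String))) (out : List (String × List (List (String × String)))) : Decidable (Spec_categorize_markers_py markers out) := by unfold Spec_categorize_markers_py; infer_instance

-- ===== CLAIM (what is proved, stated in full; the proofs are below) =====
def Claim_equal_categorize_markers_py : Prop := ∀ (markers : List (List (String × String))), Dom_categorize_markers_py markers → Spec_categorize_markers_py markers (categorize_markers_py markers)

-- ===== LEMMAS AND PROOFS =====

-- A's resolved category and cleaned marker, named for the proofs
def pvCat (m : List (String × String)) : String :=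
  (PySem.Dict.ofList m).getD "category" "clinical_chemistry"

def pvClean (m : List (String × String)) : List (String × String) :=
  (PySem.Dict.ofList m).items.filter (fun kv => kv.1 != "category")

-- A's loop body, named
def pvStep (cats : PySem.Dict String (List (List (String × String))))
    (marker : List (String × String)) : PySem.Dict String (List (List (String × String))) :=
  let category := (PySem.Dict.ofList marker).getD "category" "clinical_chemistry"
  if cats.contains category then
    let clean_marker := (PySem.Dict.ofList marker).items.filter (fun kv => kv.1 != "category")
    cats.modify category [] (fun l => l ++ [clean_marker])
  else cats

lemma pv_find_map {ν : Type} (names : List String) (f : String → ν) (s : String)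
    (hs : s ∈ names) :
    List.find? (fun p => p.1 == s) (names.map fun c => (c, f c)) = some (s, f s) := by
  induction names with
  | nil => cases hs
  | cons c rest ih =>
    by_cases h : c = s
    · subst h; simp
    · have hs' : s ∈ rest := by
        rcases List.mem_cons.mp hs with h1 | h1
        · exact absurd h1.symm h
        · exact h1
      simpa [List.find?, h] using ih hs'

lemma pv_contains_map {ν : Type} (names : List String) (f : String → ν) (s : String) :
    (PySem.Dict.mk (names.map fun c => (c, f c))).contains s = names.contains s := by
  induction names with
  | nil => rfl
  | cons c rest ih => simp only [List.map_cons, PySem.Dict.contains, List.any_cons,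
      List.contains_cons] at *; rw [← ih, BEq.comm]

lemma pv_modify_map (names : List String) (f : String → List (List (String × String)))
    (s : String) (u : List (List (String × String)) → List (List (String × String)))
    (hs : s ∈ names) :
    (PySem.Dict.mk (names.map fun c => (c, f c))).modify s [] u
      = PySem.Dict.mk (names.map fun c => (c, if c = s then u (f c) else f c)) := by
  have hc : (PySem.Dict.mk (names.map fun c => (c, f c))).contains s = true := by
    rw [pv_contains_map]; exact List.contains_iff_mem.mpr hs
  have hg : (PySem.Dict.mk (names.map fun c => (c, f c))).getD s [] = f s := by
    simp [PySem.Dict.getD, PySem.Dict.get?, pv_find_map names f s hs]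
  simp only [PySem.Dict.modify, PySem.Dict.insert, hc, hg, if_pos]
  congr 1
  rw [List.map_map]
  apply List.map_congr_left
  intro c _
  by_cases h : c = s
  · subst h; simp
  · simp [h]

lemma pv_foldl_key (markers : List (List (String × String)))
    (f : String → List (List (String × String))) :
    (markers.foldl pvStep (PySem.Dict.mk (pvCatNames.map fun c => (c, f c)))).items
      = pvCatNames.map
          (fun c => (c, f c ++ (markers.filter (fun m => pvCat m == c)).map pvClean)) := by
  induction markers generalizing f with
  | nil => simp
  | cons m rest ih =>
    by_cases h : pvCat m ∈ pvCatNames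
    · have hstep : pvStep (PySem.Dict.mk (pvCatNames.map fun c => (c, f c))) m
          = PySem.Dict.mk (pvCatNames.map fun c =>
              (c, if c = pvCat m then f c ++ [pvClean m] else f c)) := by
        have hc : (PySem.Dict.mk (pvCatNames.map fun c => (c, f c))).contains (pvCat m) = true := by
          rw [pv_contains_map]; exact List.contains_iff_mem.mpr h
        simp only [pvStep, pvCat, pvClean] at *
        rw [if_pos hc]
        exact pv_modify_map _ _ _ _ h
      rw [List.foldl_cons, hstep,
        ih (fun c => if c = pvCat m then f c ++ [pvClean m] else f c)]
      apply List.map_congr_left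
      intro c _
      by_cases hcm : pvCat m = c
      · subst hcm; simp
      · simp [hcm, Ne.symm hcm]
    · have hstep : pvStep (PySem.Dict.mk (pvCatNames.map fun c => (c, f c))) m
          = PySem.Dict.mk (pvCatNames.map fun c => (c, f c)) := by
        have hc : (PySem.Dict.mk (pvCatNames.map fun c => (c, f c))).contains (pvCat m) = false := by
          rw [pv_contains_map]
          exact Bool.not_eq_true _ ▸ (fun hh => h (List.contains_iff_mem.mp hh))
        simp only [pvStep, pvCat] at *
        rw [if_neg (by simp [hc])]
      rw [List.foldl_cons, hstep, ih f]
      apply List.map_congr_left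
      intro c hcmem
      have hb : (pvCat m == c) = false := by
        by_cases hb : pvCat m = c
        · exact absurd (by rw [hb]; exact hcmem) h
        · simp [hb]
      simp [hb]

lemma pv_cats0_eq :
    (PySem.Dict.ofList [("hematology", ([] : List (List (String × String)))), ("hormones", []),
      ("fatty_acids", []), ("clinical_chemistry", []), ("metals_trace_elements", []),
      ("micronutrients", []), ("clinical_immunology", [])])
      = PySem.Dict.mk (pvCatNames.map fun c => (c, [])) := by
  decide

-- ===== VERDICT (by name: the statement is the Claim_ definition above) =====
theorem categorize_markers_py_spec : Claim_equal_categorize_markers_py := by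
  intro markers _
  show categorize_markers_py markers = categorize_markers_py_alt markers
  have hA : categorize_markers_py markers
      = (markers.foldl pvStep (PySem.Dict.mk (pvCatNames.map fun c => (c, [])))).items := by
    rw [← pv_cats0_eq]; rfl
  rw [hA, pv_foldl_key markers (fun _ => [])]
  simp [categorize_markers_py_alt, pvCat, pvClean]
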